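-- pv_equiv track=rewrite | github.com/andrewsipe/Filename_Tools | FNT_WordDeduplicator.py | tokenize_segments
-- ===== SOURCE A (Python) =====
-- import unicodedata
-- from typing import Iterable, List, Tuple
--
-- def tokenize_segments(basename: str) -> List[str]:
--     """Split basename into word vs delimiter segments, preserving delimiters.
--
--     Word segments include letters and their Unicode combining marks (Mn/Mc/Me),
--     so sequences like "Su\u0308d" stay intact and don't leak marks when removed.
--     """
--     if not basename:
--         return []
--
--     def _is_mark(ch: str) -> bool:
--         try:
--             return unicodedata.category(ch).startswith("M")
--         except Exception:
--             return False
--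
--     def _is_word_char(ch: str) -> bool:
--         return ch.isalpha() or _is_mark(ch)
--
--     parts: List[str] = []
--     buf: List[str] = []
--     is_word_prev = _is_word_char(basename[0])
--     for ch in basename:
--         is_word = _is_word_char(ch)
--         if is_word == is_word_prev:
--             buf.append(ch)
--         else:
--             parts.append("".join(buf))
--             buf = [ch]
--             is_word_prev = is_word
--     if buf:
--         parts.append("".join(buf))
--     return parts
-- ===== SOURCE B (Python) =====
-- import unicodedata
-- from typing import List
--
--
-- def tokenize_segments(basename: str) -> List[str]:
--     """Split basename into word vs delimiter segments, preserving delimiters."""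
--
--     def _is_mark(ch: str) -> bool:
--         try:
--             return unicodedata.category(ch).startswith("M")
--         except Exception:
--             return False
--
--     def _is_word_char(ch: str) -> bool:
--         return ch.isalpha() or _is_mark(ch)
--
--     parts: List[str] = []
--     i = 0
--     n = len(basename)
--     while i < n:
--         kind = _is_word_char(basename[i])
--         j = i + 1
--         while j < n and _is_word_char(basename[j]) == kind:
--             j += 1
--         parts.append(basename[i:j])
--         i = j
--     return parts
-- ===== Notes on version B (the rewrite author's own statement) =====
-- stated objective: alternative
-- what changed: Replaced A's char-by-char buffer/prev-flag accumulation loop with a two-pointer scan that finds each maximal run's end index and slices the segment out of the string directly.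
import Mathlib
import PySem

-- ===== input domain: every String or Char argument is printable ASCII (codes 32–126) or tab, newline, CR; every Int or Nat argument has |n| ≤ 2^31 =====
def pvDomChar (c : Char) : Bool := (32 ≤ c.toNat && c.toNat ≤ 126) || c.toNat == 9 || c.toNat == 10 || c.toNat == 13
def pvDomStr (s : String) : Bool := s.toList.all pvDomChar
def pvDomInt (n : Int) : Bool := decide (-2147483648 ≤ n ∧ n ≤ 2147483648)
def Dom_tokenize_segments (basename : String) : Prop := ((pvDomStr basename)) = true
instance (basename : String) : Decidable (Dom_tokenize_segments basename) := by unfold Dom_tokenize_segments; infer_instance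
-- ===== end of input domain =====

-- B replaces A's buffer/prev-flag accumulation loop with a two-pointer run-boundary scan
-- that slices each maximal run out of the string directly (objective: alternative decomposition).

-- ===== PORT A =====
-- _is_word_char: ch.isalpha() or _is_mark(ch).  On the printable-ASCII domain the
-- unicodedata category of a character never starts with "M", so _is_mark is identically
-- False there and the port is exact on Dom with isalpha alone.
def pvIsWordChar (c : Char) : Bool := PySem.Chars.isalpha c

-- the for-loop of A: state (parts, buf, is_word_prev); afterwards 'if buf: parts.append(...)'
def pvALoop : List Char → Bool → List String → List Char → List String
  | [], _, parts, buf => if buf ≠ [] then parts ++ [String.ofList buf] else parts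
  | ch :: rest, prev, parts, buf =>
    let w := pvIsWordChar ch
    if w == prev then pvALoop rest prev parts (buf ++ [ch])
    else pvALoop rest w (parts ++ [String.ofList buf]) [ch]

def tokenize_segments (basename : String) : List String :=
  match basename.toList with
  | [] => []                                   -- if not basename: return []
  | c :: _ => pvALoop basename.toList (pvIsWordChar c) [] []

-- ===== PORT B =====
-- B: while i < n: scan j to the end of the current run, append basename[i:j], i = j.
-- The inner 'while j < n and same kind' scan is takeWhile on the tail; 'i = j' is dropWhile.
def pvBScan : List Char → List String
  | [] => []
  | c :: rest =>
    let k := pvIsWordChar c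
    String.ofList (c :: rest.takeWhile (fun d => pvIsWordChar d == k)) ::
      pvBScan (rest.dropWhile (fun d => pvIsWordChar d == k))
termination_by l => l.length
decreasing_by
  simp only [List.length_cons]
  exact Nat.lt_succ_of_le (List.length_dropWhile_le _ _)

def tokenize_segments_alt (basename : String) : List String :=
  pvBScan basename.toList

-- ===== PRECONDITION & SPEC =====
def Spec_tokenize_segments (basename : String) (out : List String) : Prop := out = tokenize_segments_alt basename
instance (basename : String) (out : List String) : Decidable (Spec_tokenize_segments basename out) := by unfold Spec_tokenize_segments; infer_instance

-- ===== CLAIM (what is proved, stated in full; the proofs are below) =====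
def Claim_equal_tokenize_segments : Prop := ∀ (basename : String), Dom_tokenize_segments basename → Spec_tokenize_segments basename (tokenize_segments basename)

-- ===== LEMMAS AND PROOFS =====

-- A's loop with the 'parts' accumulator factored out
def pvF : Bool → List Char → List Char → List String
  | _, buf, [] => if buf ≠ [] then [String.ofList buf] else []
  | prev, buf, ch :: rest =>
    let w := pvIsWordChar ch
    if w == prev then pvF prev (buf ++ [ch]) rest
    else String.ofList buf :: pvF w [ch] rest

theorem pvALoop_eq_pvF (l : List Char) :
    ∀ prev parts buf, pvALoop l prev parts buf = parts ++ pvF prev buf l := by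
  induction l with
  | nil => intro prev parts buf; simp only [pvALoop, pvF]; split <;> simp
  | cons ch rest ih =>
    intro prev parts buf
    simp only [pvALoop, pvF]
    split
    · exact ih _ _ _
    · rw [ih]; simp

theorem pvF_eq_pvBScan (l : List Char) :
    ∀ prev buf, buf ≠ [] →
      pvF prev buf l =
        String.ofList (buf ++ l.takeWhile (fun d => pvIsWordChar d == prev)) ::
          pvBScan (l.dropWhile (fun d => pvIsWordChar d == prev)) := by
  induction l with
  | nil => intro prev buf h; simp [pvF, pvBScan, h]
  | cons ch rest ih =>
    intro prev buf h
    simp only [pvF, List.takeWhile, List.dropWhile]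
    by_cases hw : pvIsWordChar ch == prev
    · simp only [hw, if_true]
      rw [ih prev (buf ++ [ch]) (by simp)]
      simp
    · simp only [hw, Bool.false_eq_true, if_false]
      rw [ih (pvIsWordChar ch) [ch] (by simp), pvBScan]
      simp

theorem tokenize_eq (basename : String) :
    tokenize_segments basename = tokenize_segments_alt basename := by
  unfold tokenize_segments tokenize_segments_alt
  cases hl : basename.toList with
  | nil => simp [pvBScan]
  | cons c rest =>
    show pvALoop (c :: rest) (pvIsWordChar c) [] [] = pvBScan (c :: rest)
    rw [pvALoop_eq_pvF]
    simp only [pvF, beq_self_eq_true, List.nil_append, if_true]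
    rw [pvF_eq_pvBScan rest (pvIsWordChar c) [c] (by simp), pvBScan]
    simp

-- ===== VERDICT (by name: the statement is the Claim_ definition above) =====
theorem tokenize_segments_spec : Claim_equal_tokenize_segments := by
  intro basename _
  exact tokenize_eq basename
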